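-- pv_equiv track=rewrite | github.com/YiwenC23/DSCI560-group_labs | lab6/scripts/pdf_extraction.py | select_value
-- ===== SOURCE A (Python) =====
-- from collections import Counter
--
-- def longest_common_prefix(str_list):
--     if not str_list:
--         return ""
--     prefix = str_list[0]
--
--     for s in str_list[1:]:
--         while not s.startswith(prefix):
--             prefix = prefix[:-1]
--             if not prefix:
--                 return ""
--     return prefix
--
-- def trim_value_by_keywords(value, keywords):
--     min_index = len(value)
--
--     for kw in keywords:
--         idx = value.find(kw)
--         if idx != -1 and idx < min_index:
--             min_index = idx
--
--     return value[:min_index].strip() if min_index < len(value) else value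
--
-- def select_value(values, keywords=None):
--     if not values:
--         return None
--
--     if keywords:
--         processed_values = [trim_value_by_keywords(val, keywords) for val in values]
--     else:
--         processed_values = values
--
--     common_part = longest_common_prefix(processed_values)
--     if common_part:
--         return common_part
--
--     longest_run_value = processed_values[0]
--     longest_run_length = 1
--     current_value = processed_values[0]
--     current_length = 1
--
--     for val in processed_values[1:]:
--         if val == current_value:
--             current_length += 1
--         else:
--             if current_length > longest_run_length:
--                 longest_run_length = current_length
--                 longest_run_value = current_value
--             current_value = val
--             current_length = 1
--
--     if current_length > longest_run_length:
--         longest_run_length = current_length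
--         longest_run_value = current_value
--
--     if longest_run_length > 1:
--         return longest_run_value
--
--     counts = Counter(processed_values)
--     max_freq = max(counts.values())
--
--     if max_freq > 1:
--         candidates = [v for v, cnt in counts.items() if cnt == max_freq]
--         return sorted(candidates)[0]
--     else:
--         return sorted(processed_values)[0]
-- ===== SOURCE B (Python) =====
-- from collections import Counter
-- from itertools import groupby
--
--
-- def trim_value_by_keywords(value, keywords):
--     m = min((i for i in (value.find(kw) for kw in keywords) if i != -1),
--             default=len(value))
--     return value[:m].strip() if m < len(value) else value
--
--
-- def longest_common_prefix(str_list):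
--     if not str_list:
--         return ""
--     chars = []
--     for col in zip(*str_list):
--         if all(c == col[0] for c in col):
--             chars.append(col[0])
--         else:
--             break
--     return "".join(chars)
--
--
-- def select_value(values, keywords=None):
--     if not values:
--         return None
--
--     if keywords:
--         processed_values = [trim_value_by_keywords(v, keywords) for v in values]
--     else:
--         processed_values = values
--
--     common_part = longest_common_prefix(processed_values)
--     if common_part:
--         return common_part
--
--     runs = [(k, sum(1 for _ in g)) for k, g in groupby(processed_values)]
--     best_value, best_length = max(runs, key=lambda r: r[1])
--     if best_length > 1:
--         return best_value
--
--     counts = Counter(processed_values)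
--     max_freq = max(counts.values())
--     if max_freq > 1:
--         return min(v for v, c in counts.items() if c == max_freq)
--     return min(processed_values)
-- ===== Notes on version B (the rewrite author's own statement) =====
-- stated objective: alternative
-- what changed: The longest-common-prefix is computed by a column scan over zip(*strings) instead of A's prefix-shrinking while-loop, the longest-run pass becomes a groupby run-length list consumed with max(key=length), the keyword trim uses min over a comprehension of found indices instead of an accumulator loop, and the sorted(...)[0] picks become min(...).
import Mathlib
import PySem

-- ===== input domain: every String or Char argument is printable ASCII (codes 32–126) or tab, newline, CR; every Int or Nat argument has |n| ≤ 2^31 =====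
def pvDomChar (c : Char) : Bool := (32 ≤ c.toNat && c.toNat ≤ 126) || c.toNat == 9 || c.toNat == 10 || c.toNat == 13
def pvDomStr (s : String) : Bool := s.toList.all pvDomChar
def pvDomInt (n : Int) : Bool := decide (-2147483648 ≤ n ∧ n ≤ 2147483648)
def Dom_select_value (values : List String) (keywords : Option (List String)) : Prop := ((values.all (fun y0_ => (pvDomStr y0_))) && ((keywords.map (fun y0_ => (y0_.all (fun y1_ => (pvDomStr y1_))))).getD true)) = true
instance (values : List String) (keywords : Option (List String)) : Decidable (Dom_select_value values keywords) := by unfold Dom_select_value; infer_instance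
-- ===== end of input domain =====

-- B replaces the prefix-shrinking LCP loop by a column scan over zip(*strings), the run
-- bookkeeping by a groupby-style run-length list consumed with max(key=len), and the
-- sorted(...)[0] picks by min(...)  (objective: alternative decomposition, same cost).

-- ===== PORT A =====
-- the `while not s.startswith(prefix): prefix = prefix[:-1]; if not prefix: return ""` loop;
-- `prefix[:-1]` is dropLast (PySem.List.slice_to_neg_one); none = the early `return ""`
def pvShrinkA (s pre : List Char) : Option (List Char) :=
  if h : PySem.Chars.startswith s pre = true then some pre
  else if pre.dropLast = [] then none else pvShrinkA s pre.dropLast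
termination_by pre.length
decreasing_by
  have hne : pre ≠ [] := by
    rintro rfl
    exact h (by rw [PySem.Chars.startswith_iff]; exact List.nil_prefix)
  have h2 : 0 < pre.length := List.length_pos_of_ne_nil hne
  simp only [List.length_dropLast]; omega

-- the `for s in str_list[1:]` loop of longest_common_prefix
def pvLcpGoA (pre : List Char) (rest : List (List Char)) : List Char :=
  match rest with
  | [] => pre
  | s :: t =>
    match pvShrinkA s pre with
    | none => []
    | some p => pvLcpGoA p t

def pvLcpA (l : List (List Char)) : List Char :=
  match l with
  | [] => []
  | p :: rest => pvLcpGoA p rest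

-- trim_value_by_keywords: the `for kw in keywords` min-index loop
def pvTrimA (value : String) (kws : List String) : String :=
  let minIdx := kws.foldl
    (fun m kw =>
      let idx := PySem.Str.find value kw
      if idx ≠ -1 ∧ idx < m then idx else m)
    (PySem.Str.len value)
  if minIdx < PySem.Str.len value then
    PySem.Str.strip (PySem.Str.slice value none (some minIdx))
  else value

-- the longest-run loop body of select_value (state = (longest_run_value, longest_run_length, current_value, current_length))
def pvRunStepA (st : String × Int × String × Int) (val : String) : String × Int × String × Int :=
  match st with
  | (lrv, lrl, cv, cl) =>
    if val = cv then (lrv, lrl, cv, cl + 1)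
    else if cl > lrl then (cv, cl, val, 1) else (lrv, lrl, val, 1)

def select_value (values : List String) (keywords : Option (List String)) : Option String :=
  if values = [] then none
  else
    let processed :=
      match keywords with   -- `if keywords:` — None and [] are falsy
      | some kws => if kws = [] then values else values.map (fun v => pvTrimA v kws)
      | none => values
    let common := pvLcpA (processed.map String.toList)
    if common ≠ [] then some (String.ofList common)
    else
      match processed with
      | [] => none        -- unreachable: values ≠ [] keeps processed nonempty
      | p0 :: rest =>
        match rest.foldl pvRunStepA (p0, 1, p0, 1) with
        | (lrv, lrl, cv, cl) =>
          let fin := if cl > lrl then (cv, cl) else (lrv, lrl)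
          if fin.2 > 1 then some fin.1
          else
            let counts := PySem.Dict.counter processed
            match PySem.List.max? counts.values (fun x => x) with
            | none => none   -- unreachable: counts nonempty
            | some maxFreq =>
              if maxFreq > 1 then
                let candidates := (counts.items.filter (fun p => p.2 = maxFreq)).map (·.1)
                PySem.List.pyGet? (PySem.List.sorted candidates (fun x => x) false) 0
              else
                PySem.List.pyGet? (PySem.List.sorted processed (fun x => x) false) 0

-- ===== PORT B =====
def pvTrimB (value : String) (kws : List String) : String :=
  let hits := (kws.map (fun kw => PySem.Str.find value kw)).filter (fun i => i ≠ -1)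
  let m := PySem.List.minD hits (fun x => x) (PySem.Str.len value)
  if m < PySem.Str.len value then
    PySem.Str.strip (PySem.Str.slice value none (some m))
  else value

-- zip(*str_list): the character columns, truncated at the shortest string
def pvColumns (l : List (List Char)) : List (List Char) :=
  match l with
  | [] => []
  | s :: rest =>
    let n := rest.foldl (fun m t => min m t.length) s.length
    (List.range n).map (fun i => (s :: rest).map (fun t => t.getD i ' '))

-- `for col in zip(*str_list): if all(c == col[0] for c in col): chars.append(col[0]) else: break`
def pvColScan (cols : List (List Char)) (acc : List Char) : List Char :=
  match cols with
  | [] => acc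
  | col :: rest =>
    match col with
    | [] => acc            -- unreachable: every column is nonempty
    | c :: cs => if (c :: cs).all (fun d => d = c) then pvColScan rest (acc ++ [c]) else acc

def pvLcpB (l : List (List Char)) : List Char :=
  match l with
  | [] => []
  | _ :: _ => pvColScan (pvColumns l) []

-- groupby(processed_values) as a run-length list
def pvRunStepB (st : List (String × Int) × String × Int) (v : String) : List (String × Int) × String × Int :=
  match st with
  | (runs, cv, cl) => if v = cv then (runs, cv, cl + 1) else (runs ++ [(cv, cl)], v, 1)

def pvRunsB (l : List String) : List (String × Int) :=
  match l with
  | [] => []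
  | x :: t =>
    match t.foldl pvRunStepB ([], x, 1) with
    | (runs, cv, cl) => runs ++ [(cv, cl)]

def select_value_alt (values : List String) (keywords : Option (List String)) : Option String :=
  if values = [] then none
  else
    let processed :=
      match keywords with
      | some kws => if kws = [] then values else values.map (fun v => pvTrimB v kws)
      | none => values
    let common := pvLcpB (processed.map String.toList)
    if common ≠ [] then some (String.ofList common)
    else
      match PySem.List.max? (pvRunsB processed) (fun r => r.2) with
      | none => none       -- unreachable: processed nonempty
      | some best =>
        if best.2 > 1 then some best.1
        else
          let counts := PySem.Dict.counter processed
          match PySem.List.max? counts.values (fun x => x) with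
          | none => none   -- unreachable
          | some maxFreq =>
            if maxFreq > 1 then
              PySem.List.min? ((counts.items.filter (fun p => p.2 = maxFreq)).map (·.1)) (fun x => x)
            else
              PySem.List.min? processed (fun x => x)

-- ===== PRECONDITION & SPEC =====
def Spec_select_value (values : List String) (keywords : Option (List String)) (out : Option String) : Prop := out = select_value_alt values keywords
instance (values : List String) (keywords : Option (List String)) (out : Option String) : Decidable (Spec_select_value values keywords out) := by unfold Spec_select_value; infer_instance

-- ===== CLAIM (what is proved, stated in full; the proofs are below) =====
def Claim_equal_select_value : Prop := ∀ (values : List String) (keywords : Option (List String)), Dom_select_value values keywords → Spec_select_value values keywords (select_value values keywords)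

-- ===== LEMMAS AND PROOFS =====

theorem foldMin (xs : List Int) (m : Int) :
    xs.foldl (fun m i => if i ≠ -1 ∧ i < m then i else m) m
      = (xs.filter (fun i => i ≠ -1)).foldl min m := by
  induction xs generalizing m with
  | nil => rfl
  | cons x t ih =>
    by_cases hx : x = -1
    · subst hx; simp [ih]
    · have hacc : (if x ≠ -1 ∧ x < m then x else m) = min m x := by
        by_cases hlt : x < m <;> simp [hx, hlt, Int.min_def]
      simp only [List.foldl_cons, List.filter_cons]
      rw [hacc, if_pos (show (decide (x ≠ -1)) = true by simp [hx]), List.foldl_cons, ih]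

theorem foldMin_le (hits : List Int) (L : Int) (hle : ∀ i ∈ hits, i ≤ L) :
    hits.foldl min L = PySem.List.minD hits (fun x => x) L := by
  cases hits with
  | nil => rfl
  | cons h t =>
    rw [PySem.List.minD, PySem.List.min?_id_cons]
    simp only [Option.getD_some, List.foldl_cons]
    have : min L h = h := by have := hle h (by simp); omega
    rw [this]

theorem trim_eq (value : String) (kws : List String) : pvTrimA value kws = pvTrimB value kws := by
  unfold pvTrimA pvTrimB
  have key : kws.foldl (fun m kw => let idx := PySem.Str.find value kw;
        if idx ≠ -1 ∧ idx < m then idx else m) (PySem.Str.len value)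
      = PySem.List.minD ((kws.map (fun kw => PySem.Str.find value kw)).filter (fun i => i ≠ -1))
          (fun x => x) (PySem.Str.len value) := by
    rw [← List.foldl_map (f := fun kw => PySem.Str.find value kw)
          (g := fun m i => if i ≠ -1 ∧ i < m then i else m)]
    rw [foldMin, foldMin_le]
    intro i hi
    simp only [List.mem_filter, List.mem_map] at hi
    obtain ⟨⟨kw, _, rfl⟩, _⟩ := hi
    simp only [PySem.Str.find, PySem.Str.len]
    exact_mod_cast PySem.Chars.find_le_length value.toList kw.toList
  rw [key]


theorem sortedHead_eq_min (l : List String) :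
    PySem.List.pyGet? (PySem.List.sorted l (fun x => x) false) 0 =
      PySem.List.min? l (fun x => x) := by
  rw [PySem.List.pyGet?_zero]
  cases hm : PySem.List.min? l (fun x => x) with
  | none =>
    rw [PySem.List.min?_eq_none_iff] at hm
    subst hm; rfl
  | some m =>
    have hmem := PySem.List.min?_mem hm
    have hmin := PySem.List.min?_isMin hm
    have hperm := PySem.List.sorted_perm l (fun x => x) false
    cases hs : PySem.List.sorted l (fun x => x) false with
    | nil =>
      rw [PySem.List.sorted_eq_nil_iff] at hs
      subst hs; simp at hmem
    | cons h t =>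
      have hpair := PySem.List.sorted_pairwise l (fun x => x)
      rw [hs] at hpair hperm
      have hhead_le : ∀ y ∈ l, h ≤ y := by
        intro y hy
        have : y ∈ h :: t := hperm.mem_iff.mpr hy
        rcases this with _ | hyt
        · exact le_refl _
        · exact (List.pairwise_cons.mp hpair).1 y (by assumption)
      have h1 : m ≤ h := hmin h (hperm.mem_iff.mp (by simp))
      have h2 : h ≤ m := hhead_le m hmem
      simp [le_antisymm h1 h2]


def step1 (b p : String × Int) : String × Int := if b.2 < p.2 then p else b

def fm (l : List (String × Int)) : String × Int :=
  match l with
  | [] => ("", 0)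
  | r :: rt => rt.foldl step1 r

def R (runs : List (String × Int)) (lrv : String) (lrl : Int) (cv : String) (cl : Int) : Prop :=
  (runs = [] → lrv = cv ∧ lrl = 1) ∧ (runs ≠ [] → (lrv, lrl) = fm runs) ∧ 1 ≤ cl

theorem max?_fm (l : List (String × Int)) (h : l ≠ []) :
    PySem.List.max? l (fun r => r.2) = some (fm l) := by
  cases l with
  | nil => simp at h
  | cons r rt =>
    show List.foldl _ none (r :: rt) = _
    rw [List.foldl_cons]
    show List.foldl _ (some r) rt = some (fm (r :: rt))
    simp only [fm]
    induction rt generalizing r with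
    | nil => rfl
    | cons p pt ih =>
      simp only [List.foldl_cons]
      rw [show (if r.2 < p.2 then some p else some r) = some (step1 r p) by
            unfold step1; split <;> simp_all]
      exact ih _ (by simp)

theorem boundary (runs : List (String × Int)) (lrv cv : String) (lrl cl : Int)
    (hR : R runs lrv lrl cv cl) :
    fm (runs ++ [(cv, cl)]) = if cl > lrl then (cv, cl) else (lrv, lrl) := by
  obtain ⟨h0, h1, hcl⟩ := hR
  cases runs with
  | nil =>
    obtain ⟨rfl, rfl⟩ := h0 rfl
    simp only [List.nil_append, fm, List.foldl_nil]
    split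
    · rfl
    · have : cl = 1 := by omega
      rw [this]
  | cons r rt =>
    have h2 := h1 (by simp)
    simp only [fm, List.cons_append, List.foldl_append, List.foldl_cons, List.foldl_nil] at *
    rw [← h2]
    unfold step1
    rfl

theorem mainInv (rest : List String) : ∀ (runs : List (String × Int)) (lrv cv : String) (lrl cl : Int),
    R runs lrv lrl cv cl →
    (match rest.foldl pvRunStepA (lrv, lrl, cv, cl) with
     | (a, b, c, d) => if d > b then (c, d) else (a, b))
    = fm (match rest.foldl pvRunStepB (runs, cv, cl) with
          | (rs, c2, d2) => rs ++ [(c2, d2)]) := by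
  induction rest with
  | nil =>
    intro runs lrv cv lrl cl hR
    simp only [List.foldl_nil]
    exact (boundary runs lrv cv lrl cl hR).symm
  | cons v rest' ih =>
    intro runs lrv cv lrl cl hR
    simp only [List.foldl_cons]
    by_cases hv : v = cv
    · rw [show pvRunStepA (lrv, lrl, cv, cl) v = (lrv, lrl, cv, cl + 1) by
            unfold pvRunStepA; simp [hv],
          show pvRunStepB (runs, cv, cl) v = (runs, cv, cl + 1) by
            unfold pvRunStepB; simp [hv]]
      exact ih runs lrv cv lrl (cl + 1) ⟨hR.1, hR.2.1, by have := hR.2.2; omega⟩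
    · rw [show pvRunStepB (runs, cv, cl) v = (runs ++ [(cv, cl)], v, 1) by
            unfold pvRunStepB; simp [hv]]
      have hb := boundary runs lrv cv lrl cl hR
      by_cases hgt : cl > lrl
      · rw [show pvRunStepA (lrv, lrl, cv, cl) v = (cv, cl, v, 1) by
              unfold pvRunStepA; simp [hv, hgt]]
        refine ih _ _ _ _ _ ⟨by simp, fun _ => ?_, le_refl 1⟩
        rw [hb, if_pos hgt]
      · rw [show pvRunStepA (lrv, lrl, cv, cl) v = (lrv, lrl, v, 1) by
              unfold pvRunStepA; simp [hv, hgt]]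
        refine ih _ _ _ _ _ ⟨by simp, fun _ => ?_, le_refl 1⟩
        rw [hb, if_neg hgt]

theorem runs_eq (p0 : String) (rest : List String) :
    PySem.List.max? (pvRunsB (p0 :: rest)) (fun r => r.2) =
      some (match rest.foldl pvRunStepA (p0, 1, p0, 1) with
            | (lrv, lrl, cv, cl) => if cl > lrl then (cv, cl) else (lrv, lrl)) := by
  have hR : R [] p0 1 p0 1 := ⟨fun _ => ⟨rfl, rfl⟩, fun h => absurd rfl h, le_refl 1⟩
  have hmain := mainInv rest [] p0 p0 1 1 hR
  unfold pvRunsB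
  rcases hB : rest.foldl pvRunStepB ([], p0, 1) with ⟨rs, c2, d2⟩
  rw [hB] at hmain
  rcases hA : rest.foldl pvRunStepA (p0, 1, p0, 1) with ⟨a, bb, c, d⟩
  rw [hA] at hmain
  simp only at hmain ⊢
  rw [max?_fm _ (by simp)]
  simp [hB, ← hmain]


-- ---------- spec ----------
def CP (l : List (List Char)) (r : List Char) : Prop := ∀ m ∈ l, r <+: m

def LCPSpec (head : List Char) (rest : List (List Char)) (r : List Char) : Prop :=
  r <+: head ∧ CP rest r ∧ ∀ c, c <+: head → CP rest c → c <+: r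

theorem lcpspec_unique {h : List Char} {rest : List (List Char)} {r1 r2 : List Char}
    (s1 : LCPSpec h rest r1) (s2 : LCPSpec h rest r2) : r1 = r2 := by
  have h12 : r1 <+: r2 := s2.2.2 r1 s1.1 s1.2.1
  have h21 : r2 <+: r1 := s1.2.2 r2 s2.1 s2.2.1
  exact List.IsPrefix.eq_of_length h12 (le_antisymm h12.length_le h21.length_le)

-- ---------- A-side ----------
theorem shrink_spec (s pre : List Char) :
    (∀ p, pvShrinkA s pre = some p →
        p <+: pre ∧ p <+: s ∧ ∀ c, c <+: pre → c <+: s → c <+: p) ∧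
    (pvShrinkA s pre = none → ∀ c, c <+: pre → c <+: s → c = []) := by
  induction pre using pvShrinkA.induct (s := s) with
  | case1 pre h =>
    rw [PySem.Chars.startswith_iff] at h
    constructor
    · rintro p hp
      rw [pvShrinkA] at hp
      rw [dif_pos (by rw [PySem.Chars.startswith_iff]; exact h)] at hp
      obtain rfl : pre = p := by simpa using hp
      exact ⟨List.prefix_refl _, h, fun c hc _ => hc⟩
    · intro hn
      rw [pvShrinkA, dif_pos (by rw [PySem.Chars.startswith_iff]; exact h)] at hn
      simp at hn
  | case2 pre h hdrop =>
    have hrw : pvShrinkA s pre = none := by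
      rw [pvShrinkA, dif_neg h, if_pos hdrop]
    constructor
    · intro p hp; rw [hrw] at hp; simp at hp
    · intro _ c hc hcs
      have hpre : pre ≠ [] := by
        rintro rfl
        exact h (by rw [PySem.Chars.startswith_iff]; exact List.nil_prefix)
      match pre, hdrop with
      | [a], _ =>
        rcases List.prefix_cons_iff.mp hc with h1 | ⟨t, rfl, ht⟩
        · exact h1
        · have : t = [] := List.prefix_nil.mp ht
          subst this
          exact absurd (by rw [PySem.Chars.startswith_iff]; exact hcs) h
  | case3 pre h hdrop ih =>
    have hrw : pvShrinkA s pre = pvShrinkA s pre.dropLast := by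
      rw [pvShrinkA, dif_neg h, if_neg hdrop]
    have hstep : ∀ c, c <+: pre → c <+: s → c <+: pre.dropLast := by
      intro c hc hcs
      have hne : c ≠ pre := by
        rintro rfl
        exact h (by rw [PySem.Chars.startswith_iff]; exact hcs)
      have hlt : c.length < pre.length :=
        lt_of_le_of_ne hc.length_le (fun he => hne (List.IsPrefix.eq_of_length hc he))
      rw [List.dropLast_eq_take]
      calc c = pre.take c.length := List.prefix_iff_eq_take.mp hc
        _ <+: pre.take (pre.length - 1) := List.take_prefix_take_left (by omega)
    constructor
    · intro p hp
      rw [hrw] at hp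
      obtain ⟨h1, h2, h3⟩ := ih.1 p hp
      exact ⟨h1.trans (List.dropLast_prefix pre), h2,
        fun c hc hcs => h3 c (hstep c hc hcs) hcs⟩
    · intro hn c hc hcs
      rw [hrw] at hn
      exact ih.2 hn c (hstep c hc hcs) hcs

theorem lcpGoA_spec (rest : List (List Char)) : ∀ pre, LCPSpec pre rest (pvLcpGoA pre rest) := by
  induction rest with
  | nil =>
    intro pre
    exact ⟨List.prefix_refl _, fun m hm => absurd hm (List.not_mem_nil), fun c hc _ => hc⟩
  | cons s t ih =>
    intro pre
    unfold pvLcpGoA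
    cases hs : pvShrinkA s pre with
    | none =>
      have hn := (shrink_spec s pre).2 hs
      refine ⟨List.nil_prefix, fun m _ => List.nil_prefix, fun c hc hcp => ?_⟩
      have : c = [] := hn c hc (hcp s (by simp))
      simp [this]
    | some p =>
      obtain ⟨h1, h2, h3⟩ := (shrink_spec s pre).1 p hs
      obtain ⟨g1, g2, g3⟩ := ih p
      refine ⟨g1.trans h1, ?_, ?_⟩
      · intro m hm
        rcases hm with _ | hm
        · exact g1.trans h2
        · exact g2 m (by assumption)
      · intro c hc hcp
        exact g3 c (h3 c hc (hcp s (by simp))) (fun m hm => hcp m (by simp [hm]))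

theorem lcpA_spec (head : List Char) (rest : List (List Char)) :
    LCPSpec head rest (pvLcpA (head :: rest)) := lcpGoA_spec rest head

-- ---------- B-side ----------
def goodCol (col : List Char) : Bool :=
  match col with
  | [] => false
  | c :: cs => (c :: cs).all (fun d => d = c)

theorem colScan_shift (cols : List (List Char)) : ∀ acc, pvColScan cols acc = acc ++ pvColScan cols [] := by
  induction cols with
  | nil => intro acc; simp [pvColScan]
  | cons col rest ih =>
    intro acc
    unfold pvColScan
    match col with
    | [] => simp
    | c :: cs =>
      by_cases hall : (c :: cs).all (fun d => d = c)
      · simp only [hall, if_true]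
        rw [ih (acc ++ [c]), ih ([] ++ [c])]
        simp
      · simp [hall]

theorem colScan_eq_takeWhile (cols : List (List Char)) :
    pvColScan cols [] = (cols.takeWhile goodCol).map (fun col => col.headD ' ') := by
  induction cols with
  | nil => rfl
  | cons col rest ih =>
    unfold pvColScan
    match col with
    | [] => simp [goodCol]
    | c :: cs =>
      by_cases hall : (c :: cs).all (fun d => d = c)
      · simp only [hall, if_true]
        rw [colScan_shift, List.takeWhile_cons, show goodCol (c :: cs) = true from hall]
        simp [ih]
      · rw [List.takeWhile_cons, show goodCol (c :: cs) = false from by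
              unfold goodCol; simpa using hall]
        simp [hall]

theorem foldmin_le_init (l : List (List Char)) : ∀ a : Nat, l.foldl (fun m t => min m t.length) a ≤ a := by
  induction l with
  | nil => intro a; simp
  | cons t rest ih =>
    intro a
    simp only [List.foldl_cons]
    exact (ih _).trans (min_le_left _ _)

theorem foldmin_le_mem (l : List (List Char)) : ∀ (a : Nat) (t : List Char), t ∈ l → l.foldl (fun m t => min m t.length) a ≤ t.length := by
  induction l with
  | nil => intro a t ht; simp at ht
  | cons u rest ih =>
    intro a t ht
    rcases ht with _ | ht
    · simp only [List.foldl_cons]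
      exact (foldmin_le_init rest _).trans (min_le_right _ _)
    · exact ih _ t (by assumption)

theorem le_foldmin (l : List (List Char)) : ∀ (a c : Nat), c ≤ a → (∀ t ∈ l, c ≤ t.length) → c ≤ l.foldl (fun m t => min m t.length) a := by
  induction l with
  | nil => intro a c h _; simpa using h
  | cons u rest ih =>
    intro a c h hall
    simp only [List.foldl_cons]
    exact ih _ c (le_min h (hall u (by simp))) (fun t ht => hall t (by simp [ht]))

theorem takeWhile_getElem_false {α : Type} (p : α → Bool) :
    ∀ (l : List α) (i : Nat), i = (l.takeWhile p).length → ∀ (h : i < l.length), p (l[i]'h) = false := by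
  intro l
  induction l with
  | nil => intro i hi h; simp at h
  | cons x t ih =>
    intro i hi h
    cases hp : p x with
    | false =>
      rw [List.takeWhile_cons_of_neg (by simp [hp])] at hi
      subst hi
      simpa using hp
    | true =>
      rw [List.takeWhile_cons_of_pos hp] at hi
      subst hi
      have h' : (t.takeWhile p).length < t.length := by simpa using h
      simpa using ih _ rfl h'

theorem lcpB_spec (s : List Char) (rest : List (List Char)) :
    LCPSpec s rest (pvLcpB (s :: rest)) := by
  set n := rest.foldl (fun m t => min m t.length) s.length with hn
  have hns : n ≤ s.length := foldmin_le_init rest s.length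
  have hnt : ∀ t ∈ rest, n ≤ t.length := fun t ht => foldmin_le_mem rest s.length t ht
  set colf : Nat → List Char := fun i => (s :: rest).map (fun t => t.getD i ' ') with hcolf
  have hB : pvLcpB (s :: rest) = ((List.range n).takeWhile (fun i => goodCol (colf i))).map (fun i => (colf i).headD ' ') := by
    show pvColScan (pvColumns (s :: rest)) [] = _
    rw [show pvColumns (s :: rest) = (List.range n).map colf from rfl]
    rw [colScan_eq_takeWhile, List.takeWhile_map, List.map_map]
    rfl
  set P : Nat → Bool := fun i => goodCol (colf i) with hP
  set j := ((List.range n).takeWhile P).length with hj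
  have hjn : j ≤ n := by
    have := (List.takeWhile_prefix (l := List.range n) (p := P)).length_le
    simpa using this
  have htw : (List.range n).takeWhile P = List.range j := by
    have hpre := List.takeWhile_prefix (l := List.range n) (p := P)
    have := List.prefix_iff_eq_take.mp hpre
    rw [← hj] at this
    rw [this, List.take_range]
    congr 1
    omega
  -- every i < j has a constant column
  have hgood : ∀ i, i < j → ∀ t ∈ rest, t.getD i ' ' = s.getD i ' ' := by
    intro i hi t ht
    have hmem : i ∈ (List.range n).takeWhile P := by
      rw [htw]; exact List.mem_range.mpr hi
    have hPi : P i = true := List.mem_takeWhile_imp hmem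
    rw [hP] at hPi
    simp only [hcolf, goodCol, List.map_cons] at hPi
    have := (List.all_eq_true.mp hPi) (t.getD i ' ') (by
      simp only [List.mem_cons, List.mem_map]
      right; exact ⟨t, ht, rfl⟩)
    simpa using this
  have hres : pvLcpB (s :: rest) = s.take j := by
    rw [hB, htw]
    apply List.ext_getElem
    · simp; omega
    · intro i h1 h2
      simp only [List.getElem_map, List.getElem_range, List.getElem_take]
      have hil : i < s.length := by simp at h2; omega
      simp only [hcolf, List.map_cons, List.headD_cons]
      exact List.getD_eq_getElem s ' ' hil
  rw [hres]
  refine ⟨List.take_prefix j s, ?_, ?_⟩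
  · -- common prefix of every t ∈ rest
    intro t ht
    have hstake : s.take j = t.take j := by
      apply List.ext_getElem
      · simp
        have := hnt t ht
        omega
      · intro i h1 h2
        simp only [List.getElem_take]
        have his : i < s.length := by simp at h1; omega
        have hit : i < t.length := by simp at h2; omega
        have := hgood i (by simp at h1; omega) t ht
        rw [List.getD_eq_getElem s ' ' his, List.getD_eq_getElem t ' ' hit] at this
        exact this.symm
    rw [hstake]
    exact List.take_prefix j t
  · -- maximality
    intro c hc hcp
    have hclen : c.length ≤ j := by
      by_contra hgt
      rw [not_le] at hgt
      have hcn : c.length ≤ n := le_foldmin rest s.length c.length hc.length_le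
        (fun t ht => (hcp t ht).length_le)
      have hjlt : j < (List.range n).length := by simp; omega
      have hfalse := takeWhile_getElem_false P (List.range n) j (by rw [hj]) hjlt
      rw [List.getElem_range] at hfalse
      have hPj : P j = true := by
        rw [hP]
        simp only [hcolf, goodCol, List.map_cons]
        rw [List.all_eq_true]
        intro d hd
        have hjc : j < c.length := hgt
        have hjs : j < s.length := by omega
        have hsc : s.getD j ' ' = c.getD j ' ' := by
          rw [List.getD_eq_getElem s ' ' hjs, List.getD_eq_getElem c ' ' hjc]
          exact (List.IsPrefix.getElem hc hjc).symm
        simp only [List.mem_cons, List.mem_map] at hd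
        rcases hd with rfl | ⟨t, ht, rfl⟩
        · simp
        · have hjt : j < t.length := by have := (hcp t ht).length_le; omega
          have htc : t.getD j ' ' = c.getD j ' ' := by
            rw [List.getD_eq_getElem t ' ' hjt, List.getD_eq_getElem c ' ' hjc]
            exact (List.IsPrefix.getElem (hcp t ht) hjc).symm
          have hts := htc.trans hsc.symm
          simpa [List.getD] using hts
      rw [hfalse] at hPj
      simp at hPj
    calc c = s.take c.length := List.prefix_iff_eq_take.mp hc
      _ <+: s.take j := List.take_prefix_take_left hclen

theorem lcp_eq (l : List (List Char)) : pvLcpA l = pvLcpB l := by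
  cases l with
  | nil => rfl
  | cons s rest => exact lcpspec_unique (lcpA_spec s rest) (lcpB_spec s rest)


-- ===== VERDICT (by name: the statement is the Claim_ definition above) =====
theorem select_value_spec : Claim_equal_select_value := by
  intro values keywords _
  unfold Spec_select_value select_value select_value_alt
  by_cases hv : values = []
  · simp [hv]
  · rw [if_neg hv, if_neg hv]
    simp only [trim_eq, lcp_eq]
    generalize hproc : (match keywords with
      | some kws => if kws = [] then values else List.map (fun v => pvTrimB v kws) values
      | none => values) = processed
    have hpne : processed ≠ [] := by
      rw [← hproc]
      cases keywords with
      | none => exact hv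
      | some kws =>
        by_cases hk : kws = []
        · simp [hk, hv]
        · simp [hk, hv]
    by_cases hl : pvLcpB (processed.map String.toList) ≠ []
    · rw [if_pos hl, if_pos hl]
    · rw [if_neg hl, if_neg hl]
      cases hp : processed with
      | nil => exact absurd hp hpne
      | cons p0 rest =>
        simp only [runs_eq]
        rcases List.foldl pvRunStepA (p0, 1, p0, 1) rest with ⟨a, b, c, d⟩
        simp only [sortedHead_eq_min]
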